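-- pv_equiv track=rewrite | github.com/pholawat-tle/sudoku-solver | main.py | checkRowsLegal
-- ===== SOURCE A (Python) =====
-- def cloneGrid(grid):
--     newList = []
--     for row in grid:
--         newList.append(row[:])
--
--     return newList
--
-- def cloneRow(row):
--     newRow = []
--     for member in row:
--         newRow.append(member)
--
--     return newRow
--
-- def checkRowsLegal(grid):
--     gridClone = cloneGrid(grid)
--
--     answer = True
--     for row in gridClone:
--         rowAnswer = checkRowLegal(row)
--         answer = answer and rowAnswer
--         if answer == False:
--             break
--     return answer
--
-- def checkRowLegal(row):
--     temp = []
--     rowClone = cloneRow(row)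
--     for _ in row:
--         child = rowClone.pop()
--         if child != 0:
--             if child not in temp:
--                 temp.append(child)
--             else:
--                 return False
--     return True
-- ===== SOURCE B (Python) =====
-- def checkRowsLegal(grid):
--     return all(
--         len([x for x in row if x != 0]) == len({x for x in row if x != 0})
--         for row in grid
--     )
-- ===== Notes on version B (the rewrite author's own statement) =====
-- stated objective: simpler
-- what changed: Replaced the clone-and-pop loop with an element-by-element seen-list scan by a single expression that, per row, compares the count of nonzero cells with the number of distinct nonzero cells.
import Mathlib
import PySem

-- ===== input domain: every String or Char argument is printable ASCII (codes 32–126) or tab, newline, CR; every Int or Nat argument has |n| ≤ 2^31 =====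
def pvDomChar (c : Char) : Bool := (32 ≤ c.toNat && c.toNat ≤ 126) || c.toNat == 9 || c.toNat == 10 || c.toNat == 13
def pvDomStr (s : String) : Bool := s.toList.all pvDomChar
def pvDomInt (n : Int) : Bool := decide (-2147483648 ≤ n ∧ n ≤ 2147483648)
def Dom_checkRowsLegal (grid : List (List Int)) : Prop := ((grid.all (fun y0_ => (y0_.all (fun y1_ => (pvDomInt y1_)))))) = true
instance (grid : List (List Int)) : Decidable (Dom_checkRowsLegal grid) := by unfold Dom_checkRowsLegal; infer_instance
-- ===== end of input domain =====

-- B replaces A's clone-and-pop seen-list loop by a per-row comparison of the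
-- number of nonzero cells with the number of distinct nonzero cells (simpler).

-- ===== PORT A =====
def cloneRowA (row : List Int) : List Int :=
  row.foldl (fun newRow member => newRow ++ [member]) []

def cloneGridA (grid : List (List Int)) : List (List Int) :=
  grid.foldl (fun newList row => newList ++ [row]) []

-- loop 'for _ in row: child = rowClone.pop(); …' of checkRowLegal
def checkRowLegalGo : List Int → List Int → List Int → Bool
  | [], _, _ => true
  | _ :: fuel, rowClone, temp =>
    match PySem.List.pop? rowClone with
    | none => true  -- unreachable: rowClone holds as many elements as remain in the fuel
    | some (child, rowClone') =>
      if child ≠ 0 then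
        if ¬ temp.contains child then
          checkRowLegalGo fuel rowClone' (temp ++ [child])
        else false
      else checkRowLegalGo fuel rowClone' temp

def checkRowLegalA (row : List Int) : Bool :=
  checkRowLegalGo row (cloneRowA row) []

-- loop 'for row in gridClone: …; if answer == False: break'
def checkRowsLegalGo : List (List Int) → Bool → Bool
  | [], answer => answer
  | row :: rest, answer =>
    let answer' := answer && checkRowLegalA row
    if answer' = false then answer' else checkRowsLegalGo rest answer'

def checkRowsLegal (grid : List (List Int)) : Bool :=
  checkRowsLegalGo (cloneGridA grid) true

-- ===== PORT B =====
def checkRowsLegal_alt (grid : List (List Int)) : Bool :=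
  grid.all fun row =>
    (row.filter (fun x => decide (x ≠ 0))).length ==
      (PySem.Set.ofList (row.filter (fun x => decide (x ≠ 0)))).length

-- ===== PRECONDITION & SPEC =====
def Spec_checkRowsLegal (grid : List (List Int)) (out : Bool) : Prop := out = checkRowsLegal_alt grid
instance (grid : List (List Int)) (out : Bool) : Decidable (Spec_checkRowsLegal grid out) := by unfold Spec_checkRowsLegal; infer_instance

-- ===== CLAIM (what is proved, stated in full; the proofs are below) =====
def Claim_equal_checkRowsLegal : Prop := ∀ (grid : List (List Int)), Dom_checkRowsLegal grid → Spec_checkRowsLegal grid (checkRowsLegal grid)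

-- ===== LEMMAS AND PROOFS =====

theorem foldl_append_id {α : Type} (l acc : List α) :
    l.foldl (fun a m => a ++ [m]) acc = acc ++ l := by
  induction l generalizing acc with
  | nil => simp
  | cons x xs ih => simp [List.foldl, ih]

theorem cloneRowA_eq (row : List Int) : cloneRowA row = row := by
  rw [cloneRowA, foldl_append_id, List.nil_append]

theorem cloneGridA_eq (grid : List (List Int)) : cloneGridA grid = grid := by
  rw [cloneGridA, foldl_append_id, List.nil_append]

-- left-to-right reading of the pop-from-the-end loop (proof helper)
def scanRev : List Int → List Int → Bool
  | [], _ => true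
  | c :: cs, temp =>
    if c ≠ 0 then
      if ¬ temp.contains c then scanRev cs (temp ++ [c]) else false
    else scanRev cs temp

theorem go_eq_scanRev (fuel clone temp : List Int)
    (h : clone.length = fuel.length) :
    checkRowLegalGo fuel clone temp = scanRev clone.reverse temp := by
  induction fuel generalizing clone temp with
  | nil =>
    have : clone = [] := List.eq_nil_of_length_eq_zero (by simpa using h)
    simp [this, checkRowLegalGo, scanRev]
  | cons f fs ih =>
    have hne : clone ≠ [] := by
      intro hc; subst hc; simp at h
    obtain ⟨ys, x, rfl⟩ := (clone.eq_nil_or_concat).resolve_left hne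
    rw [List.concat_eq_append] at h ⊢
    have hlen : ys.length = fs.length := by
      simpa using h
    simp only [checkRowLegalGo, PySem.List.pop?_last, List.reverse_append,
      List.reverse_singleton, List.singleton_append, scanRev]
    split_ifs with h1 h2 <;> first | rfl | exact ih ys _ hlen

theorem scanRev_nodup (l temp : List Int) (htemp : temp.Nodup) :
    scanRev l temp = true ↔ (temp ++ l.filter (fun x => decide (x ≠ 0))).Nodup := by
  induction l generalizing temp with
  | nil => simp [scanRev, htemp]
  | cons c cs ih =>
    by_cases hc : c = 0
    · subst hc
      simpa [scanRev] using ih temp htemp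
    · by_cases hmem : temp.contains c
      · have hcmem : c ∈ temp := by simpa using hmem
        constructor
        · intro hh
          exfalso
          simp only [scanRev] at hh
          rw [if_pos hc, if_neg (not_not_intro hmem)] at hh
          exact Bool.false_ne_true hh
        · intro hh
          exfalso
          rw [List.filter_cons_of_pos (by simpa using hc)] at hh
          exact (List.nodup_append.mp hh).2.2 c hcmem c (List.mem_cons_self ..) rfl
      · have hcnot : c ∉ temp := fun hm => hmem (by simpa using hm)
        have hnd : (temp ++ [c]).Nodup := by
          simp [List.nodup_append, htemp]
          exact fun a ha hb => hcnot (hb ▸ ha)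
        rw [show scanRev (c :: cs) temp = scanRev cs (temp ++ [c]) by
          simp only [scanRev]
          rw [if_pos hc, if_pos hmem]]
        rw [ih (temp ++ [c]) hnd, List.filter_cons_of_pos (by simpa using hc)]
        rw [List.append_assoc, List.singleton_append]

theorem ofList_length_eq_iff (l : List Int) :
    ((PySem.Set.ofList l : List Int).length = l.length) ↔ l.Nodup := by
  have hperm : (PySem.Set.ofList l : List Int).Perm l.dedup := by
    rw [List.perm_ext_iff_of_nodup (PySem.Set.nodup_ofList l) l.nodup_dedup]
    intro a
    rw [PySem.Set.mem_ofList, List.mem_dedup]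
  rw [hperm.length_eq]
  constructor
  · intro h
    exact List.dedup_eq_self.mp ((l.dedup_sublist).eq_of_length h)
  · intro h
    rw [List.dedup_eq_self.mpr h]

theorem row_eq (row : List Int) :
    checkRowLegalA row =
      ((row.filter (fun x => decide (x ≠ 0))).length ==
        (PySem.Set.ofList (row.filter (fun x => decide (x ≠ 0)))).length) := by
  rw [Bool.eq_iff_iff, beq_iff_eq]
  rw [checkRowLegalA, cloneRowA_eq, go_eq_scanRev row row [] rfl]
  rw [scanRev_nodup _ [] List.nodup_nil]
  rw [List.nil_append, List.filter_reverse, List.nodup_reverse]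
  rw [← ofList_length_eq_iff]
  exact ⟨fun h => h.symm, fun h => h.symm⟩

theorem rowsGo_eq_all (rs : List (List Int)) :
    checkRowsLegalGo rs true = rs.all checkRowLegalA := by
  induction rs with
  | nil => rfl
  | cons r rest ih =>
    rw [checkRowsLegalGo]
    by_cases hr : checkRowLegalA r
    · simp [hr, ih]
    · simp at hr
      simp [hr]

-- ===== VERDICT (by name: the statement is the Claim_ definition above) =====
theorem checkRowsLegal_spec : Claim_equal_checkRowsLegal := by
  intro grid _
  unfold Spec_checkRowsLegal
  rw [checkRowsLegal, cloneGridA_eq, rowsGo_eq_all, checkRowsLegal_alt]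
  exact congrArg (List.all grid) (funext row_eq)
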